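-- pv_equiv track=rewrite | github.com/hud-evals/01-coding-template | src/ast_pilot/grader_gen.py | _find_header_insert_at
-- ===== SOURCE A (Python) =====
-- def _find_header_insert_at(lines: list[str]) -> int:
--     insert_at = 0
--     in_docstring = False
--
--     for idx, line in enumerate(lines):
--         stripped = line.strip()
--         if idx == 0 and stripped.startswith(('"""', "'''")):
--             quote = stripped[:3]
--             if stripped.count(quote) >= 2 and len(stripped) > 3:
--                 insert_at = idx + 1
--                 continue
--             in_docstring = True
--             insert_at = idx + 1
--             continue
--
--         if in_docstring:
--             insert_at = idx + 1
--             if stripped.endswith(('"""', "'''")):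
--                 in_docstring = False
--             continue
--
--         if stripped.startswith("from __future__"):
--             insert_at = idx + 1
--             continue
--
--         if not stripped or stripped.startswith("#"):
--             continue
--         break
--
--     return insert_at
-- ===== SOURCE B (Python) =====
-- def _find_header_insert_at(lines: list[str]) -> int:
--     # Phase-split rewrite: handle a line-0 docstring first, then scan the header.
--     pos = 0
--     i = 0
--     if lines:
--         s0 = lines[0].strip()
--         if s0.startswith('"""') or s0.startswith("'''"):
--             q = s0[:3]
--             if s0.count(q) >= 2 and len(s0) > 3:
--                 i = 1
--             else:
--                 i = 1
--                 while i < len(lines):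
--                     t = lines[i].strip()
--                     i += 1
--                     if t.endswith('"""') or t.endswith("'''"):
--                         break
--             pos = i
--     while i < len(lines):
--         s = lines[i].strip()
--         if s.startswith("from __future__"):
--             pos = i + 1
--         elif s and not s.startswith("#"):
--             break
--         i += 1
--     return pos
-- ===== Notes on version B (the rewrite author's own statement) =====
-- stated objective: alternative
-- what changed: Replaced A's single flag-based loop over enumerate with an explicit phase decomposition: a line-0 docstring handler with an inner consume loop, followed by a separate header-scan loop over the remaining lines.
import Mathlib
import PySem

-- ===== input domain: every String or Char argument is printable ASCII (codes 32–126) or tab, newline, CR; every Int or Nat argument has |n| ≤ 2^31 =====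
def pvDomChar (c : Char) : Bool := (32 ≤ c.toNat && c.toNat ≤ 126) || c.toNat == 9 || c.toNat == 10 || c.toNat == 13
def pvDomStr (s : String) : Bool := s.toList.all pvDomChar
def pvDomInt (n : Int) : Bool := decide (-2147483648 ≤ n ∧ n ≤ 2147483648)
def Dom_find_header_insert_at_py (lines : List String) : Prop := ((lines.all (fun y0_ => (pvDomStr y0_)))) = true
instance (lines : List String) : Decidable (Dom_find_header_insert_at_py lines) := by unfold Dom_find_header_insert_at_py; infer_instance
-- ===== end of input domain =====

-- B splits A's flag-based single loop into explicit phases (docstring consumption, then header scan); same cost, different decomposition.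

-- ===== PORT A =====
-- A's single for-loop over enumerate(lines) with state (insert_at, in_docstring); break = stop, returning ins.
def pyA_loop : List String → Int → Int → Bool → Int
  | [], _, ins, _ => ins
  | line :: rest, idx, ins, ind =>
    let stripped := PySem.Str.strip line
    if idx = 0 ∧ (PySem.Str.startswith stripped "\"\"\"" || PySem.Str.startswith stripped "'''") = true then
      let quote := PySem.Str.slice stripped none (some 3)
      if 2 ≤ PySem.Str.count stripped quote ∧ 3 < PySem.Str.len stripped then
        pyA_loop rest (idx + 1) (idx + 1) ind
      else
        pyA_loop rest (idx + 1) (idx + 1) true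
    else if ind = true then
      if (PySem.Str.endswith stripped "\"\"\"" || PySem.Str.endswith stripped "'''") = true then
        pyA_loop rest (idx + 1) (idx + 1) false
      else
        pyA_loop rest (idx + 1) (idx + 1) true
    else if PySem.Str.startswith stripped "from __future__" = true then
      pyA_loop rest (idx + 1) (idx + 1) ind
    else if stripped = "" ∨ PySem.Str.startswith stripped "#" = true then
      pyA_loop rest (idx + 1) ins ind
    else ins

def find_header_insert_at_py (lines : List String) : Int :=
  pyA_loop lines 0 0 false

-- ===== PORT B =====
-- Phase 1 inner while: consume docstring lines until one ends with a triple quote; returns (i, remaining lines).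
def pyB_consume : List String → Int → Int × List String
  | [], i => (i, [])
  | l :: rest, i =>
    let t := PySem.Str.strip l
    if (PySem.Str.endswith t "\"\"\"" || PySem.Str.endswith t "'''") = true then (i + 1, rest)
    else pyB_consume rest (i + 1)

-- Phase 2 while: record pos only on `from __future__` lines, skip blanks/comments, break on real code.
def pyB_scan : List String → Int → Int → Int
  | [], _, pos => pos
  | l :: rest, i, pos =>
    let s := PySem.Str.strip l
    if PySem.Str.startswith s "from __future__" = true then
      pyB_scan rest (i + 1) (i + 1)
    else if ¬ (s = "" ∨ PySem.Str.startswith s "#" = true) then pos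
    else pyB_scan rest (i + 1) pos

def find_header_insert_at_py_alt (lines : List String) : Int :=
  match lines with
  | [] => 0
  | l0 :: rest =>
    let s0 := PySem.Str.strip l0
    if (PySem.Str.startswith s0 "\"\"\"" || PySem.Str.startswith s0 "'''") = true then
      let q := PySem.Str.slice s0 none (some 3)
      if 2 ≤ PySem.Str.count s0 q ∧ 3 < PySem.Str.len s0 then
        pyB_scan rest 1 1
      else
        let r := pyB_consume rest 1
        pyB_scan r.2 r.1 r.1
    else
      pyB_scan (l0 :: rest) 0 0

-- ===== PRECONDITION & SPEC =====
def Spec_find_header_insert_at_py (lines : List String) (out : Int) : Prop := out = find_header_insert_at_py_alt lines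
instance (lines : List String) (out : Int) : Decidable (Spec_find_header_insert_at_py lines out) := by unfold Spec_find_header_insert_at_py; infer_instance

-- ===== CLAIM (what is proved, stated in full; the proofs are below) =====
def Claim_equal_find_header_insert_at_py : Prop := ∀ (lines : List String), Dom_find_header_insert_at_py lines → Spec_find_header_insert_at_py lines (find_header_insert_at_py lines)

-- ===== LEMMAS AND PROOFS =====

-- Normal mode at a nonzero index equals phase-2 scanning.
theorem pyA_norm (rest : List String) : ∀ (i ins : Int), 0 ≤ i →
    pyA_loop rest (i + 1) ins false = pyB_scan rest (i + 1) ins := by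
  induction rest with
  | nil => intro i ins _; rfl
  | cons l rest ih =>
    intro i ins hi
    simp only [pyA_loop, pyB_scan]
    rw [if_neg (by rintro ⟨h, -⟩; omega), if_neg (by simp)]
    by_cases hf : PySem.Str.startswith (PySem.Str.strip l) "from __future__" = true
    · rw [if_pos hf, if_pos hf]; exact ih (i + 1) (i + 1 + 1) (by omega)
    · rw [if_neg hf, if_neg hf]
      by_cases hb : PySem.Str.strip l = "" ∨ PySem.Str.startswith (PySem.Str.strip l) "#" = true
      · rw [if_pos hb, if_neg (not_not_intro hb)]
        exact ih (i + 1) ins (by omega)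
      · rw [if_neg hb, if_pos hb]

-- Docstring mode with ins = current index equals consume-then-scan.
theorem pyA_doc (rest : List String) : ∀ (j : Int), 0 ≤ j →
    pyA_loop rest (j + 1) (j + 1) true =
      pyB_scan (pyB_consume rest (j + 1)).2 (pyB_consume rest (j + 1)).1
        (pyB_consume rest (j + 1)).1 := by
  induction rest with
  | nil => intro j _; rfl
  | cons l rest ih =>
    intro j hj
    simp only [pyA_loop, pyB_consume]
    rw [if_neg (by rintro ⟨h, -⟩; omega), if_pos (by trivial)]
    by_cases he : (PySem.Str.endswith (PySem.Str.strip l) "\"\"\"" ||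
        PySem.Str.endswith (PySem.Str.strip l) "'''") = true
    · rw [if_pos he, if_pos he]
      exact pyA_norm rest (j + 1) (j + 1 + 1) (by omega)
    · rw [if_neg he, if_neg he]
      exact ih (j + 1) (by omega)

-- ===== VERDICT (by name: the statement is the Claim_ definition above) =====
theorem find_header_insert_at_py_spec : Claim_equal_find_header_insert_at_py := by
  intro lines _
  unfold Spec_find_header_insert_at_py find_header_insert_at_py find_header_insert_at_py_alt
  match lines with
  | [] => rfl
  | l0 :: rest =>
    simp only [pyA_loop]
    by_cases hs : (PySem.Str.startswith (PySem.Str.strip l0) "\"\"\"" ||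
        PySem.Str.startswith (PySem.Str.strip l0) "'''") = true
    · rw [if_pos (⟨by trivial, hs⟩ : _ ∧ _), if_pos hs]
      split_ifs with h1
      · exact pyA_norm rest 0 1 le_rfl
      · exact pyA_doc rest 0 le_rfl
    · rw [if_neg (by rintro ⟨-, h⟩; exact hs h), if_neg hs, if_neg (by simp)]
      simp only [pyB_scan]
      by_cases hf : PySem.Str.startswith (PySem.Str.strip l0) "from __future__" = true
      · rw [if_pos hf, if_pos hf]; exact pyA_norm rest 0 1 le_rfl
      · rw [if_neg hf, if_neg hf]
        by_cases hb : PySem.Str.strip l0 = "" ∨ PySem.Str.startswith (PySem.Str.strip l0) "#" = true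
        · rw [if_pos hb, if_neg (not_not_intro hb)]
          exact pyA_norm rest 0 0 le_rfl
        · rw [if_neg hb, if_pos hb]
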